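-- pv_equiv track=rewrite | github.com/JusticeProject/Members-On-The-Record | src/RetrieveTwitterHandles.py | updateListOfHandles
-- ===== SOURCE A (Python) =====
-- def updateListOfHandles(listOfHandles, listTwitterHandleChanges):
--     for handle1,handle2 in listTwitterHandleChanges:
--         if (len(handle2) <= 1):
--             continue
--
--         for i in range(0, len(listOfHandles)):
--             if (listOfHandles[i].lower() == handle1.lower()):
--                 listOfHandles[i] = handle2.lower()
--
--     return listOfHandles
-- ===== SOURCE B (Python) =====
-- def updateListOfHandles(listOfHandles, listTwitterHandleChanges):
--     # Build a lowercase-value -> indices map once, update it per rename rule: O(C + H)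
--     index = {}
--     for i, h in enumerate(listOfHandles):
--         index.setdefault(h.lower(), []).append(i)
--     out = list(listOfHandles)
--     for handle1, handle2 in listTwitterHandleChanges:
--         if len(handle2) <= 1:
--             continue
--         k1 = handle1.lower()
--         k2 = handle2.lower()
--         ids = index.get(k1, [])
--         if not ids:
--             continue
--         index[k1] = []
--         for i in ids:
--             out[i] = k2
--         index[k2] = index.get(k2, []) + ids
--     listOfHandles[:] = out
--     return listOfHandles
-- ===== Notes on version B (the rewrite author's own statement) =====
-- stated objective: faster
-- what changed: Replaces A's per-rule scan of the whole handle list with a lowercase-value-to-indices dictionary built once and updated incrementally per rename rule.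
import Mathlib
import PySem

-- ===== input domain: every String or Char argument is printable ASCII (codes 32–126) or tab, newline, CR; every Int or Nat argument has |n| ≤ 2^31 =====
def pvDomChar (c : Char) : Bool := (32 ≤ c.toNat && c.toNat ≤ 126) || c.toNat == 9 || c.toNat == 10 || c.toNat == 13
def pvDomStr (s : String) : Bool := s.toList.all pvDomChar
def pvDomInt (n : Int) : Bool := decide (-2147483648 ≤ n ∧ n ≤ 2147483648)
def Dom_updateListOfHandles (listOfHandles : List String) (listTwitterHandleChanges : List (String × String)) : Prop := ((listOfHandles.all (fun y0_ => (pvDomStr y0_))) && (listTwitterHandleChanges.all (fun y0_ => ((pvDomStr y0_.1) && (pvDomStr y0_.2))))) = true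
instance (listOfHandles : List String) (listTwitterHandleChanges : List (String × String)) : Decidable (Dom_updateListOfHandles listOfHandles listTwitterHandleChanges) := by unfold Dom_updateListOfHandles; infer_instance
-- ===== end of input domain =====

-- B replaces A's per-rule scan of the whole handle list by a lowercase-value → indices map built once
-- and updated per rule (objective: faster, O(C+H) vs O(C·H)).  Both A and the Python B mutate
-- listOfHandles in place and return it; the equivalence proved here is about the return value.

-- ===== PORT A =====
def updateListOfHandles (listOfHandles : List String) (listTwitterHandleChanges : List (String × String)) : List String :=
  listTwitterHandleChanges.foldl (fun acc c =>
    if PySem.Str.len c.2 ≤ 1 then acc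
    else
      (PySem.List.pyRange 0 (PySem.List.len acc) 1).foldl
        (fun acc2 i =>
          -- listOfHandles[i] with i ∈ range(len): in range, so the total pyGetD/pySetD are exact
          if PySem.Str.lower (PySem.List.pyGetD acc2 i "") = PySem.Str.lower c.1
          then PySem.List.pySetD acc2 i (PySem.Str.lower c.2) else acc2) acc) listOfHandles

-- ===== PORT B =====
-- per-rule update of (out, index): skip short handle2, pop indices of handle1.lower(), write
-- handle2.lower() at those positions, append them to the entry of handle2.lower()
def pvAltStep (st : List String × PySem.Dict String (List Nat)) (c : String × String) : List String × PySem.Dict String (List Nat) :=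
  if PySem.Str.len c.2 ≤ 1 then st
  else
    let k1 := PySem.Str.lower c.1
    let k2 := PySem.Str.lower c.2
    let ids := st.2.getD k1 []
    if ids = [] then st
    else
      let idx1 := st.2.insert k1 []
      (ids.foldl (fun o j => o.set j k2) st.1, idx1.insert k2 (idx1.getD k2 [] ++ ids))

def updateListOfHandles_alt (listOfHandles : List String) (listTwitterHandleChanges : List (String × String)) : List String :=
  -- build the lowercase-value → indices map once ('for i, h in enumerate: setdefault(h.lower(), []).append(i)')
  let idx := (List.range listOfHandles.length).foldl
    (fun d j =>
      let k := PySem.Str.lower (listOfHandles.getD j "")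
      d.insert k (d.getD k [] ++ [j])) PySem.Dict.empty
  (listTwitterHandleChanges.foldl pvAltStep (listOfHandles, idx)).1

-- ===== PRECONDITION & SPEC =====
def Spec_updateListOfHandles (listOfHandles : List String) (listTwitterHandleChanges : List (String × String)) (out : List String) : Prop := out = updateListOfHandles_alt listOfHandles listTwitterHandleChanges
instance (listOfHandles : List String) (listTwitterHandleChanges : List (String × String)) (out : List String) : Decidable (Spec_updateListOfHandles listOfHandles listTwitterHandleChanges out) := by unfold Spec_updateListOfHandles; infer_instance

-- ===== CLAIM (what is proved, stated in full; the proofs are below) =====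
def Claim_equal_updateListOfHandles : Prop := ∀ (listOfHandles : List String) (listTwitterHandleChanges : List (String × String)), Dom_updateListOfHandles listOfHandles listTwitterHandleChanges → Spec_updateListOfHandles listOfHandles listTwitterHandleChanges (updateListOfHandles listOfHandles listTwitterHandleChanges)

-- ===== LEMMAS AND PROOFS =====

-- the effect of one rule, stated as a map over the current list
def pvRuleStep (o : List String) (c : String × String) : List String :=
  if PySem.Str.len c.2 ≤ 1 then o
  else o.map (fun h => if PySem.Str.lower h = PySem.Str.lower c.1 then PySem.Str.lower c.2 else h)

-- the index invariant: idx maps k to exactly the positions whose lowercased value is k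
def pvInv (out : List String) (idx : PySem.Dict String (List Nat)) : Prop :=
  ∀ (k : String) (j : Nat), j ∈ idx.getD k [] ↔ (∃ h, out[j]? = some h ∧ PySem.Str.lower h = k)

theorem pv_lowerChar_idem (c : Char) : PySem.Chars.lowerChar (PySem.Chars.lowerChar c) = PySem.Chars.lowerChar c := by
  unfold PySem.Chars.lowerChar PySem.Chars.isupper
  split_ifs with h1 h2
  · exfalso
    simp only [Bool.and_eq_true, decide_eq_true_eq, Char.le_def] at h1 h2
    have hA : ('A' : Char).val = 65 := rfl
    have hZ : ('Z' : Char).val = 90 := rfl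
    have hb : c.toNat ≤ 90 := by have := h1.2; rw [hZ] at this; exact_mod_cast this
    have ha : 65 ≤ c.toNat := by have := h1.1; rw [hA] at this; exact_mod_cast this
    have hv : (c.toNat + 32).isValidChar := by unfold Nat.isValidChar; left; omega
    have ht : (Char.ofNat (c.toNat + 32)).toNat = c.toNat + 32 := by
      rw [Char.toNat_ofNat, if_pos hv]
    have h2b : (Char.ofNat (c.toNat + 32)).toNat ≤ 90 := by
      have := h2.2; rw [hZ] at this; exact_mod_cast this
    omega
  · rfl
  · rfl

theorem pv_lower_idem (s : String) : PySem.Str.lower (PySem.Str.lower s) = PySem.Str.lower s := by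
  unfold PySem.Str.lower PySem.Chars.lower
  congr 1
  simp [List.map_map, Function.comp_def, pv_lowerChar_idem]

-- A's inner index loop is a map over the list
theorem pv_A_aux (k1 k2 : String) : ∀ (suf pre : List String),
    (List.range' pre.length suf.length).foldl
      (fun acc i => if PySem.Str.lower (acc.getD i "") = k1 then acc.set i k2 else acc) (pre ++ suf)
    = pre ++ suf.map (fun h => if PySem.Str.lower h = k1 then k2 else h) := by
  intro suf
  induction suf with
  | nil => intro pre; simp
  | cons h t ih =>
    intro pre
    rw [List.length_cons, List.range'_succ, List.foldl_cons]
    have hget : (pre ++ h :: t).getD pre.length "" = h := by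
      simp [List.getD_eq_getElem?_getD]
    have hset : (pre ++ h :: t).set pre.length k2 = (pre ++ [k2]) ++ t := by
      rw [List.set_append]
      simp
    rw [hget]
    by_cases hc : PySem.Str.lower h = k1
    · rw [if_pos hc, hset]
      have := ih (pre ++ [k2])
      simp only [List.length_append, List.length_singleton] at this
      rw [this]
      simp [hc]
    · rw [if_neg hc]
      have h1 : pre ++ h :: t = (pre ++ [h]) ++ t := by simp
      rw [h1]
      have := ih (pre ++ [h])
      simp only [List.length_append, List.length_singleton] at this
      rw [this]
      simp [hc]

theorem pv_A_step (l : List String) (c : String × String) :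
    (if PySem.Str.len c.2 ≤ 1 then l
     else (PySem.List.pyRange 0 (PySem.List.len l) 1).foldl
        (fun acc2 i =>
          if PySem.Str.lower (PySem.List.pyGetD acc2 i "") = PySem.Str.lower c.1
          then PySem.List.pySetD acc2 i (PySem.Str.lower c.2) else acc2) l)
    = pvRuleStep l c := by
  unfold pvRuleStep
  by_cases hl : PySem.Str.len c.2 ≤ 1
  · rw [if_pos hl, if_pos hl]
  · rw [if_neg hl, if_neg hl]
    rw [PySem.List.len_eq, PySem.List.pyRange_zero_natCast, List.foldl_map]
    simp only [PySem.List.pyGetD_natCast, PySem.List.pySetD_natCast]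
    have := pv_A_aux (PySem.Str.lower c.1) (PySem.Str.lower c.2) l []
    simpa [List.range_eq_range'] using this

theorem pv_A_eq (hs : List String) (cs : List (String × String)) :
    updateListOfHandles hs cs = cs.foldl pvRuleStep hs := by
  unfold updateListOfHandles
  congr 1
  funext acc c
  exact pv_A_step acc c

theorem pv_setfold_getElem? (k2 : String) : ∀ (ids : List Nat) (out : List String) (j : Nat),
    (ids.foldl (fun o i => o.set i k2) out)[j]? =
      if j ∈ ids ∧ j < out.length then some k2 else out[j]? := by
  intro ids
  induction ids with
  | nil => intro out j; simp
  | cons i t ih =>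
    intro out j
    rw [List.foldl_cons, ih]
    simp only [List.length_set, List.getElem?_set, List.mem_cons]
    by_cases hjt : j ∈ t <;> by_cases hlen : j < out.length <;> by_cases hij : i = j <;>
      simp_all <;> omega

theorem pv_build_aux (hs : List String) : ∀ (n : Nat) (k : String) (j : Nat),
    j ∈ ((List.range n).foldl
      (fun d j =>
        let k := PySem.Str.lower (hs.getD j "")
        d.insert k (d.getD k [] ++ [j])) PySem.Dict.empty).getD k [] ↔
      (j < n ∧ PySem.Str.lower (hs.getD j "") = k) := by
  intro n
  induction n with
  | zero => intro k j; simp [PySem.Dict.getD_empty]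
  | succ n ih =>
    intro k j
    rw [List.range_succ, List.foldl_append, List.foldl_cons, List.foldl_nil]
    simp only [PySem.Dict.getD_insert]
    by_cases hk : k = PySem.Str.lower (hs.getD n "")
    · subst hk
      rw [if_pos rfl]
      simp only [List.mem_append, List.mem_singleton, ih]
      constructor
      · rintro (⟨hj, he⟩ | rfl)
        · exact ⟨by omega, he⟩
        · exact ⟨by omega, rfl⟩
      · rintro ⟨hj, he⟩
        by_cases hjn : j = n
        · right; exact hjn
        · left; exact ⟨by omega, he⟩
    · rw [if_neg hk, ih]
      constructor
      · rintro ⟨hj, he⟩; exact ⟨by omega, he⟩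
      · rintro ⟨hj, he⟩
        refine ⟨?_, he⟩
        by_cases hjn : j = n
        · subst hjn; exact absurd he.symm hk
        · omega

theorem pv_init_inv (hs : List String) :
    pvInv hs ((List.range hs.length).foldl
      (fun d j =>
        let k := PySem.Str.lower (hs.getD j "")
        d.insert k (d.getD k [] ++ [j])) PySem.Dict.empty) := by
  intro k j
  rw [pv_build_aux]
  constructor
  · rintro ⟨hj, he⟩
    refine ⟨hs[j], by simp [List.getElem?_eq_getElem hj], ?_⟩
    rwa [List.getD_eq_getElem hs "" hj] at he
  · rintro ⟨h, hg, he⟩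
    have hj : j < hs.length := by
      by_contra hc
      rw [List.getElem?_eq_none (by omega)] at hg
      simp at hg
    refine ⟨hj, ?_⟩
    rw [List.getD_eq_getElem hs "" hj]
    have : hs[j] = h := by
      have := List.getElem?_eq_getElem hj
      rw [hg] at this; exact (Option.some.injEq _ _).mp this.symm
    rw [this]; exact he

theorem pv_step_main (out : List String) (idx : PySem.Dict String (List Nat)) (c : String × String)
    (h : pvInv out idx) :
    (pvAltStep (out, idx) c).1 = pvRuleStep out c ∧ pvInv (pvRuleStep out c) (pvAltStep (out, idx) c).2 := by
  unfold pvAltStep pvRuleStep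
  by_cases hl : PySem.Str.len c.2 ≤ 1
  · rw [if_pos hl, if_pos hl]; exact ⟨rfl, h⟩
  · simp only [if_neg hl]
    by_cases hid : idx.getD (PySem.Str.lower c.1) [] = ([] : List Nat)
    · rw [if_pos hid]
      have hmap : out.map (fun h => if PySem.Str.lower h = PySem.Str.lower c.1 then PySem.Str.lower c.2 else h) = out := by
        have hmc : ∀ x ∈ out, (if PySem.Str.lower x = PySem.Str.lower c.1 then PySem.Str.lower c.2 else x) = id x := by
          intro x hx
          obtain ⟨j, hj, hje⟩ := List.mem_iff_getElem.mp hx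
          by_cases hc : PySem.Str.lower x = PySem.Str.lower c.1
          · exfalso
            have := (h (PySem.Str.lower c.1) j).mpr ⟨x, by simp [List.getElem?_eq_getElem hj, hje], hc⟩
            rw [hid] at this; simp at this
          · simp [hc]
        rw [List.map_congr_left hmc, List.map_id]
      rw [hmap]
      exact ⟨rfl, h⟩
    · rw [if_neg hid]
      set k1 := PySem.Str.lower c.1 with hk1
      set k2 := PySem.Str.lower c.2 with hk2
      have hk2i : PySem.Str.lower k2 = k2 := pv_lower_idem c.2
      set ids := idx.getD k1 [] with hids
      have hmem : ∀ j : Nat, j ∈ ids ↔ ∃ h0, out[j]? = some h0 ∧ PySem.Str.lower h0 = k1 := fun j => h k1 j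
      have hout : ids.foldl (fun o j => o.set j k2) out
          = out.map (fun h => if PySem.Str.lower h = k1 then k2 else h) := by
        apply List.ext_getElem?
        intro j
        rw [pv_setfold_getElem?, List.getElem?_map]
        by_cases hjl : j < out.length
        · have hx : out[j]? = some out[j] := List.getElem?_eq_getElem hjl
          rw [hx]
          by_cases hc : PySem.Str.lower out[j] = k1
          · rw [if_pos ⟨(hmem j).mpr ⟨out[j], hx, hc⟩, hjl⟩]
            simp [hc]
          · have : j ∉ ids := fun hin => by
              obtain ⟨h0, hh0, hl0⟩ := (hmem j).mp hin
              rw [hx] at hh0; injection hh0 with hh0; exact hc (hh0 ▸ hl0)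
            rw [if_neg (fun hp => this hp.1)]
            simp [hc]
        · rw [if_neg (fun hp => hjl hp.2)]
          rw [List.getElem?_eq_none (by omega)]
          rfl
      refine ⟨hout, ?_⟩
      intro k j
      rw [hout]
      rw [PySem.Dict.getD_insert, PySem.Dict.getD_insert]
      simp only [List.getElem?_map]
      constructor
      · intro hin
        by_cases hkk2 : k = k2
        · rw [if_pos hkk2, List.mem_append] at hin
          subst hkk2
          rcases hin with hin | hin
          · by_cases hk21 : k2 = k1
            · rw [if_pos hk21] at hin; simp at hin
            · rw [if_neg hk21] at hin
              obtain ⟨h0, hh0, hl0⟩ := (h k2 j).mp hin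
              refine ⟨if PySem.Str.lower h0 = k1 then k2 else h0, by rw [hh0]; rfl, ?_⟩
              rw [if_neg (by rw [hl0]; exact hk21), hl0]
          · obtain ⟨h0, hh0, hl0⟩ := (hmem j).mp hin
            exact ⟨k2, by rw [hh0]; simp [hl0], hk2i⟩
        · rw [if_neg hkk2, PySem.Dict.getD_insert] at hin
          by_cases hkk1 : k = k1
          · rw [if_pos hkk1] at hin; simp at hin
          · rw [if_neg hkk1] at hin
            obtain ⟨h0, hh0, hl0⟩ := (h k j).mp hin
            refine ⟨h0, ?_, hl0⟩
            rw [hh0]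
            simp [show ¬ PySem.Str.lower h0 = k1 from by rw [hl0]; exact hkk1]
      · rintro ⟨h', hh', hl'⟩
        obtain ⟨h0, hh0, hfh0⟩ : ∃ h0, out[j]? = some h0 ∧ (if PySem.Str.lower h0 = k1 then k2 else h0) = h' := by
          cases hg : out[j]? with
          | none => rw [hg] at hh'; simp at hh'
          | some x => rw [hg] at hh'; exact ⟨x, rfl, by injection hh'⟩
        by_cases hc : PySem.Str.lower h0 = k1
        · rw [if_pos hc] at hfh0
          have hkk2 : k = k2 := by rw [← hl', ← hfh0, hk2i]
          rw [if_pos hkk2, List.mem_append]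
          exact Or.inr ((hmem j).mpr ⟨h0, hh0, hc⟩)
        · rw [if_neg hc] at hfh0
          subst hfh0
          have hlk : PySem.Str.lower h0 = k := hl'
          by_cases hkk2 : k = k2
          · rw [if_pos hkk2, List.mem_append]
            left
            have hk21 : ¬ k2 = k1 := by rw [← hkk2]; rw [← hlk] at *; exact hc
            rw [if_neg hk21]
            exact (h k2 j).mpr ⟨h0, hh0, by rw [hlk, hkk2]⟩
          · rw [if_neg hkk2, PySem.Dict.getD_insert]
            have hkk1 : ¬ k = k1 := by rw [← hlk]; exact hc
            rw [if_neg hkk1]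
            exact (h k j).mpr ⟨h0, hh0, hlk⟩

theorem pv_B_fold : ∀ (cs : List (String × String)) (out : List String) (idx : PySem.Dict String (List Nat)),
    pvInv out idx → (cs.foldl pvAltStep (out, idx)).1 = cs.foldl pvRuleStep out := by
  intro cs
  induction cs with
  | nil => intro out idx _; rfl
  | cons c t ih =>
    intro out idx h
    have hm := pv_step_main out idx c h
    simp only [List.foldl_cons]
    have : pvAltStep (out, idx) c = ((pvAltStep (out, idx) c).1, (pvAltStep (out, idx) c).2) := rfl
    rw [this, hm.1]
    exact ih _ _ hm.2

-- ===== VERDICT (by name: the statement is the Claim_ definition above) =====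
theorem updateListOfHandles_spec : Claim_equal_updateListOfHandles := by
  intro hs cs _
  unfold Spec_updateListOfHandles updateListOfHandles_alt
  rw [pv_A_eq, pv_B_fold cs hs _ (pv_init_inv hs)]
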